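-- pv_equiv track=rewrite | github.com/pypi-data/pypi-mirror-111 | packages/bioezy/bioezy-0.0.5-py3-none-any.whl/bioezy/bzy.py | symbol_array
-- ===== SOURCE A (Python) =====
-- def pattern_count(text, pattern):
--     """[finds all occurences of a pattern in a text of bases]
--
--     Args:
--         text ([string]): [input string]
--         pattern ([string]): [pattern to search for in string]
--
--     Returns:
--         [int]: [running tally of how many occurrences of text were found in pattern]
--     """
--     count = 0
--     for i in range(len(text)-len(pattern)+1):
--         if text[i:i+len(pattern)] == pattern:
--             count = count+1
--     return count
--
-- def symbol_array(genome, symbol):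
--     """[helps to count the number of C in a window of Extended genome, along with pattern count]
--
--     Dependancies:
--         pattern_count
--
--     Args:
--         genome ([string]): [string to be parsed]
--         symbol ([string]): [whichever nucleotide base to be searched for, ATGC]
--
--     Returns:
--         [dict]: [symbol array of genome corresponding to symbol]
--     """
--     array = {}
--     n = len(genome)
--     Extendedgenome = genome + genome[0:n//2]
--
--     # look at the first half of genome to compute first array value
--     array[0] = pattern_count(symbol, genome[0:n//2])
--
--     for i in range(1, n):
--         # start by setting the current array value equal to the previous array value
--         array[i] = array[i-1]
--
--         # the current array value can differ from the previous array value by at most 1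
--         if Extendedgenome[i-1] == symbol:
--             array[i] = array[i]-1
--         if Extendedgenome[i+(n//2)-1] == symbol:
--             array[i] = array[i]+1
--     return array
-- ===== SOURCE B (Python) =====
-- def _occurrences(text, pattern):
--     """Overlapping occurrence count of pattern in text (same value as pattern_count)."""
--     return sum(1 for i in range(len(text) - len(pattern) + 1) if text.startswith(pattern, i))
--
-- def symbol_array(genome, symbol):
--     n = len(genome)
--     half = n // 2
--     ext = genome + genome[:half]
--     # prefix table: pre[k] = number of positions j < k with ext[j] == symbol
--     pre = [0]
--     for ch in ext:
--         pre.append(pre[-1] + (ch == symbol))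
--     base = _occurrences(symbol, genome[:half])
--     array = {0: base}
--     for i in range(1, n):
--         array[i] = base + (pre[i + half] - pre[half]) - pre[i]
--     return array
-- ===== Notes on version B (the rewrite author's own statement) =====
-- stated objective: alternative
-- what changed: Replaces A's incremental running-counter recurrence over a dict (each window value derived from the previous via two per-step corrections) with a prefix-count table over the extended genome and one closed-form arithmetic lookup per window.
import Mathlib
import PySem

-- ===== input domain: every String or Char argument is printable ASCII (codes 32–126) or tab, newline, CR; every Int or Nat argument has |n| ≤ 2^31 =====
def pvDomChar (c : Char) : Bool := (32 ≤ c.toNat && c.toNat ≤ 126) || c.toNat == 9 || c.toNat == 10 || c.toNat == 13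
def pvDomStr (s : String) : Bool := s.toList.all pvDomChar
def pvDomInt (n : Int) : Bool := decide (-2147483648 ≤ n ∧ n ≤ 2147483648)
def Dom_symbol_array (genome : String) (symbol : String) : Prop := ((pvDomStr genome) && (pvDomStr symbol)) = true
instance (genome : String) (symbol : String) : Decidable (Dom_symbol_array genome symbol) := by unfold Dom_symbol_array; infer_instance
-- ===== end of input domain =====

-- B replaces A's running-counter recurrence with a prefix-count table and a closed-form
-- lookup per window (alternative decomposition, same cost); return values agree everywhere.

-- ===== PORT A =====
-- pattern_count(text, pattern): overlapping occurrence count via slice comparison.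
def pattern_count (text : String) (pattern : String) : Int :=
  let t := text.toList
  let p := pattern.toList
  (PySem.List.pyRange 0 ((t.length : Int) - (p.length : Int) + 1) 1).foldl
    (fun count i =>
      if PySem.List.slice t (some i) (some (i + (p.length : Int))) = p then count + 1 else count) 0

-- A's dict is returned as its items list (keys 0..n-1, insertion order).
def symbol_array (genome : String) (symbol : String) : List (Int × Int) :=
  let g := genome.toList
  let n : Int := (g.length : Int)
  let half : Int := PySem.Int.floordiv n 2
  let ext := g ++ PySem.List.slice g (some 0) (some half)
  let d0 : PySem.Dict Int Int :=
    PySem.Dict.insert PySem.Dict.empty 0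
      (pattern_count symbol (String.mk (PySem.List.slice g (some 0) (some half))))
  let d := (PySem.List.pyRange 1 n 1).foldl (fun d i =>
      let v0 := PySem.Dict.getD d (i - 1) 0
      -- Extendedgenome[i-1] == symbol : a one-char string compared to symbol
      let v1 := if (PySem.List.pyGet? ext (i - 1)).map (fun c => [c]) = some symbol.toList then v0 - 1 else v0
      let v2 := if (PySem.List.pyGet? ext (i + half - 1)).map (fun c => [c]) = some symbol.toList then v1 + 1 else v1
      PySem.Dict.insert d i v2) d0
  d.items

-- ===== PORT B =====
-- _occurrences(text, pattern): sum of startswith tests.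
def occurrences_alt (text : String) (pattern : String) : Int :=
  let t := text.toList
  let p := pattern.toList
  ((PySem.List.pyRange 0 ((t.length : Int) - (p.length : Int) + 1) 1).map
    (fun i => if p.isPrefixOf (t.drop i.toNat) then (1 : Int) else 0)).sum

-- Source B builds a dict whose keys 0, 1, …, n-1 are distinct and inserted in increasing
-- order, so its items list is exactly the cons + map built here.
def symbol_array_alt (genome : String) (symbol : String) : List (Int × Int) :=
  let g := genome.toList
  let n := g.length
  let half := n / 2
  let ext := g ++ g.take half
  -- pre[k] = number of positions j < k with ext[j] == symbol
  let pre : List Int :=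
    ext.foldl (fun acc c => acc ++ [acc.getLastD 0 + (if [c] = symbol.toList then (1 : Int) else 0)]) [0]
  let base := occurrences_alt symbol (String.mk (g.take half))
  ((0 : Int), base) ::
    (PySem.List.pyRange 1 (n : Int) 1).map (fun i =>
      (i, base + (PySem.List.pyGetD pre (i + (half : Int)) 0 - PySem.List.pyGetD pre (half : Int) 0)
            - PySem.List.pyGetD pre i 0))

-- ===== PRECONDITION & SPEC =====
def Spec_symbol_array (genome : String) (symbol : String) (out : List (Int × Int)) : Prop := out = symbol_array_alt genome symbol
instance (genome : String) (symbol : String) (out : List (Int × Int)) : Decidable (Spec_symbol_array genome symbol out) := by unfold Spec_symbol_array; infer_instance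

-- ===== CLAIM (what is proved, stated in full; the proofs are below) =====
def Claim_equal_symbol_array : Prop := ∀ (genome : String) (symbol : String), Dom_symbol_array genome symbol → Spec_symbol_array genome symbol (symbol_array genome symbol)

-- ===== LEMMAS AND PROOFS =====

-- pvCnt s l: how many characters of l equal the (one-char-string) symbol s
def pvCnt (s : List Char) (l : List Char) : Int := (l.countP (fun c => decide ([c] = s)) : Int)

def pvP (s : List Char) (a : Int) : List Char → List Int
  | [] => []
  | c :: cs =>
      let b := a + (if [c] = s then (1 : Int) else 0)
      b :: pvP s b cs

theorem pvP_build (s : List Char) (l : List Char) (acc : List Int) (a : Int) :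
    l.foldl (fun acc c => acc ++ [acc.getLastD 0 + (if [c] = s then (1 : Int) else 0)]) (acc ++ [a])
      = acc ++ a :: pvP s a l := by
  induction l generalizing acc a with
  | nil => simp [pvP]
  | cons c cs ih =>
      simp only [List.foldl_cons, pvP]
      rw [List.getLastD_concat]
      have := ih (acc ++ [a]) (a + (if [c] = s then (1 : Int) else 0))
      simpa using this

theorem pvP_getD (s : List Char) (l : List Char) (a : Int) (k : Nat) (hk : k ≤ l.length) :
    (a :: pvP s a l).getD k 0 = a + pvCnt s (l.take k) := by
  induction l generalizing a k with
  | nil =>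
      obtain rfl : k = 0 := Nat.le_zero.mp hk
      simp [pvCnt]
  | cons c cs ih =>
      cases k with
      | zero => simp [pvCnt]
      | succ k =>
          simp only [pvP, List.getD_cons_succ, List.take_succ_cons]
          rw [ih _ k (by simpa using hk)]
          simp [pvCnt, List.countP_cons]
          by_cases h : [c] = s <;> simp [h] <;> ring

theorem pvCnt_take_succ (s : List Char) (l : List Char) (k : Nat) (hk : k < l.length) :
    pvCnt s (l.take (k + 1)) = pvCnt s (l.take k) + (if [l[k]] = s then (1 : Int) else 0) := by
  rw [List.take_add_one]
  simp only [pvCnt, List.countP_append, List.getElem?_eq_getElem hk, Option.toList_some]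
  simp only [List.countP_cons, List.countP_nil]
  by_cases h : [l[k]] = s
  · rw [decide_eq_true h, if_pos h]
    simp
  · rw [decide_eq_false h, if_neg h]
    simp

theorem pattern_count_eq (text pattern : String) :
    pattern_count text pattern = occurrences_alt text pattern := by
  unfold pattern_count occurrences_alt
  simp only []
  have hrw : (fun (count : Int) (i : Int) =>
        if PySem.List.slice text.toList (some i) (some (i + (pattern.toList.length : Int))) = pattern.toList
        then count + 1 else count)
      = (fun (count : Int) (i : Int) =>
        if decide (PySem.List.slice text.toList (some i) (some (i + (pattern.toList.length : Int))) = pattern.toList) = true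
        then count + 1 else count) := by
    funext count i; simp
  rw [hrw, PySem.List.foldl_count_if, PySem.List.sum_map_ite_one_zero, zero_add]
  apply congrArg
  apply List.countP_congr
  intro i hi
  have h0 : 0 ≤ i := (PySem.List.mem_pyRange_one.mp hi).1
  obtain ⟨k, rfl⟩ : ∃ k : Nat, i = (k : Int) := ⟨i.toNat, (Int.toNat_of_nonneg h0).symm⟩
  rw [PySem.List.slice_natCast_add]
  simp only [Int.toNat_natCast]
  simp only [decide_eq_true_eq, List.isPrefixOf_iff_prefix, List.prefix_iff_eq_take]
  exact eq_comm

-- the closed-form window value at key i (base = A's pattern_count base value)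
def pvF (s : List Char) (ext : List Char) (half : Nat) (base : Int) (i : Int) : Int :=
  base + (pvCnt s (ext.take (i + (half : Int)).toNat) - pvCnt s (ext.take half))
       - pvCnt s (ext.take i.toNat)


theorem pvF_zero (s ext half base) : pvF s ext half base 0 = base := by
  simp [pvF, pvCnt]


-- the loop invariant for A's fold
theorem loopA (s ext : List Char) (n half : Nat) (base : Int)
    (hlen : ext.length = n + half)
    (k : Nat) (hk : k ≤ n) :
    (PySem.List.pyRange 1 (k : Int) 1).foldl (fun d i =>
        let v0 := PySem.Dict.getD d (i - 1) 0
        let v1 := if (PySem.List.pyGet? ext (i - 1)).map (fun c => [c]) = some s then v0 - 1 else v0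
        let v2 := if (PySem.List.pyGet? ext (i + (half : Int) - 1)).map (fun c => [c]) = some s then v1 + 1 else v1
        PySem.Dict.insert d i v2)
      (PySem.Dict.insert PySem.Dict.empty 0 base)
    = PySem.Dict.mk ((0, base) :: (PySem.List.pyRange 1 (k : Int) 1).map (fun i => (i, pvF s ext half base i))) := by
  induction k with
  | zero => rw [PySem.List.pyRange_one_eq_nil (by omega)]; rfl
  | succ k ih =>
      by_cases hk1 : k = 0
      · subst hk1
        rw [show ((0+1 : Nat) : Int) = 1 by norm_num, PySem.List.pyRange_one_eq_nil (by omega)]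
        rfl
      · have hk' : k ≤ n := by omega
        have h1k : (1 : Int) ≤ (k : Int) := by omega
        rw [show ((k+1 : Nat) : Int) = (k : Int) + 1 by push_cast; ring,
            PySem.List.pyRange_one_succ_right h1k, List.foldl_append, List.map_append, ih hk']
        simp only [List.foldl_cons, List.foldl_nil, List.map_cons, List.map_nil]
        set L := (0, base) :: (PySem.List.pyRange 1 (k : Int) 1).map (fun i => (i, pvF s ext half base i)) with hL
        -- keys of the accumulated dict
        have hkeys : (PySem.Dict.mk L).keys = 0 :: (PySem.List.pyRange 1 (k : Int) 1) := by
          simp [hL, PySem.Dict.keys, List.map_map, Function.comp_def]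
        have hnodup : (PySem.Dict.mk L).keys.Nodup := by
          rw [hkeys]
          have hp : ((0 : Int) :: PySem.List.pyRange 1 (k : Int) 1).Pairwise (· < ·) := by
            refine List.pairwise_cons.mpr ⟨?_, PySem.List.pairwise_lt_pyRange_one 1 (k : Int)⟩
            intro x hx
            have := (PySem.List.mem_pyRange_one.mp hx).1; omega
          exact hp.imp ne_of_lt
        -- lookup of key k-1
        have hmem : ((k : Int) - 1, pvF s ext half base ((k : Int) - 1)) ∈ L := by
          by_cases h1 : k = 1
          · subst h1
            rw [hL, show ((1 : Nat) : Int) - 1 = 0 by norm_num, pvF_zero]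
            exact List.mem_cons_self
          · rw [hL]
            refine List.mem_cons_of_mem _ ?_
            refine List.mem_map.mpr ⟨(k : Int) - 1, ?_, rfl⟩
            rw [PySem.List.mem_pyRange_one]
            constructor <;> omega
        have hget : PySem.Dict.getD (PySem.Dict.mk L) ((k : Int) - 1) 0
            = pvF s ext half base ((k : Int) - 1) :=
          PySem.Dict.getD_of_mem_items _ hmem hnodup 0
        -- the two index reads
        have hi1 : k - 1 < ext.length := by omega
        have hi2 : k - 1 + half < ext.length := by omega
        have hg1 : PySem.List.pyGet? ext ((k : Int) - 1) = some ext[k-1] := by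
          rw [show ((k : Int) - 1) = ((k - 1 : Nat) : Int) by omega, PySem.List.pyGet?_natCast,
              List.getElem?_eq_getElem hi1]
        have hg2 : PySem.List.pyGet? ext ((k : Int) + (half : Int) - 1) = some ext[k-1+half] := by
          rw [show ((k : Int) + (half : Int) - 1) = ((k - 1 + half : Nat) : Int) by omega, PySem.List.pyGet?_natCast,
              List.getElem?_eq_getElem hi2]
        -- the step equation
        have hstep :
            (if (PySem.List.pyGet? ext ((k : Int) + (half : Int) - 1)).map (fun c => [c]) = some s then
              (if (PySem.List.pyGet? ext ((k : Int) - 1)).map (fun c => [c]) = some s then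
                pvF s ext half base ((k : Int) - 1) - 1 else pvF s ext half base ((k : Int) - 1)) + 1
            else
              (if (PySem.List.pyGet? ext ((k : Int) - 1)).map (fun c => [c]) = some s then
                pvF s ext half base ((k : Int) - 1) - 1 else pvF s ext half base ((k : Int) - 1)))
            = pvF s ext half base (k : Int) := by
          rw [hg1, hg2]
          have e1 : pvCnt s (ext.take ((k:Int)).toNat)
              = pvCnt s (ext.take ((k:Int)-1).toNat) + (if [ext[k-1]] = s then (1:Int) else 0) := by
            rw [show ((k:Int)).toNat = (k-1) + 1 by omega, show ((k:Int)-1).toNat = k-1 by omega]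
            exact pvCnt_take_succ s ext (k-1) hi1
          have e2 : pvCnt s (ext.take ((k:Int) + (half:Int)).toNat)
              = pvCnt s (ext.take (((k:Int)-1) + (half:Int)).toNat) + (if [ext[k-1+half]] = s then (1:Int) else 0) := by
            rw [show ((k:Int) + (half:Int)).toNat = (k-1+half) + 1 by omega,
                show (((k:Int)-1) + (half:Int)).toNat = k-1+half by omega]
            exact pvCnt_take_succ s ext (k-1+half) hi2
          simp only [pvF, Option.map_some]
          by_cases c1 : [ext[k-1]] = s <;> by_cases c2 : [ext[k-1+half]] = s <;>
            simp only [c1, c2, if_pos, if_neg, e1, e2] <;>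
            simp [c1, c2] <;> ring
        rw [hget, hstep]
        -- fresh insert
        have hfresh : (PySem.Dict.mk L).contains (k : Int) = false := by
          rw [PySem.Dict.contains_eq_decide_mem_keys, hkeys]
          simp only [decide_eq_false_iff_not, List.mem_cons, PySem.List.mem_pyRange_one]
          push_neg
          constructor
          · omega
          · intro h; omega
        apply PySem.Dict.ext
        rw [PySem.Dict.items_insert_of_not_contains _ _ hfresh]
        simp [hL]

theorem symbol_array_eq (genome symbol : String) :
    symbol_array genome symbol = symbol_array_alt genome symbol := by
  unfold symbol_array symbol_array_alt
  dsimp only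
  set g := genome.toList with hg
  set s := symbol.toList with hs
  set n := g.length with hn
  set half := n / 2 with hhalf
  have hhn : half ≤ n := Nat.div_le_self n 2
  have hfd : PySem.Int.floordiv (n : Int) 2 = ((half : Nat) : Int) := by
    exact_mod_cast PySem.Int.floordiv_natCast n 2
  have hslice : PySem.List.slice g (some 0) (some ((half : Nat) : Int)) = g.take half := by
    simp [PySem.List.slice_to_natCast]
  rw [hfd, hslice]
  set ext := g ++ g.take half with hext
  have hlen : ext.length = n + half := by
    simp [hext, List.length_take]
    omega
  set base := pattern_count symbol (String.mk (g.take half)) with hbase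
  rw [loopA s ext n half base hlen n le_rfl]
  have hbase' : occurrences_alt symbol (String.mk (g.take half)) = base := (pattern_count_eq _ _).symm
  rw [hbase']
  have hpre : ext.foldl (fun acc c => acc ++ [acc.getLastD 0 + (if [c] = s then (1 : Int) else 0)]) [0]
      = [] ++ (0 : Int) :: pvP s 0 ext := by
    simpa using pvP_build s ext [] 0
  simp only [List.nil_append] at hpre
  rw [hpre]
  show PySem.Dict.items _ = _
  simp only [PySem.Dict.items]
  congr 1
  apply List.map_congr_left
  intro i hi
  obtain ⟨hi1, hi2⟩ := PySem.List.mem_pyRange_one.mp hi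
  have hget : ∀ j : Int, 0 ≤ j → j.toNat ≤ ext.length →
      PySem.List.pyGetD ((0 : Int) :: pvP s 0 ext) j 0 = pvCnt s (ext.take j.toNat) := by
    intro j hj hjl
    rw [PySem.List.pyGetD_of_nonneg _ _ hj, pvP_getD s ext 0 j.toNat hjl, zero_add]
  rw [hget (i + (half : Int)) (by omega) (by omega),
      hget ((half : Nat) : Int) (by omega) (by omega),
      hget i (by omega) (by omega)]
  simp only [pvF, Int.toNat_natCast]

-- ===== VERDICT (by name: the statement is the Claim_ definition above) =====
theorem symbol_array_spec : Claim_equal_symbol_array := by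
  intro genome symbol _
  unfold Spec_symbol_array
  exact symbol_array_eq genome symbol
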